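-- pv_equiv track=rewrite | github.com/Pat-Lafon/Cobb | scripts/benchmark_data.py | sort_benchmarks
-- ===== SOURCE A (Python) =====
-- from typing import List, Dict, Tuple
--
-- def sort_benchmarks(stats: List[Dict]) -> List[Dict]:
--     """
--     Sort benchmark statistics to ensure correct ordering while preserving benchmark groupings.
--     """
--     # Define the desired order for each benchmark type
--     list_order = [
--         "sized",
--         "duplicate",
--         "unique",
--         "sorted",
--         "even",
--         "depth",
--         "complete",
--     ]
--     tree_order = ["bst", "rbtree"]
--
--     # Group stats by benchmark type
--     grouped_stats = {}
--     current_benchmark = None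
--
--     for stat in stats:
--         name = stat["name"].lower()
--
--         # Determine which benchmark this belongs to
--         if "sized list" in name:
--             current_benchmark = "sized"
--         elif "duplicate list" in name:
--             current_benchmark = "duplicate"
--         elif "unique list" in name:
--             current_benchmark = "unique"
--         elif "sorted list" in name:
--             current_benchmark = "sorted"
--         elif "even list" in name:
--             current_benchmark = "even"
--         elif "bst" in name:
--             current_benchmark = "bst"
--         elif "sized tree" in name:
--             current_benchmark = "depth"
--         elif "complete tree" in name:
--             current_benchmark = "complete"
--         elif "red-black tree" in name:
--             current_benchmark = "rbtree"
--         # For numbered entries and sketches, use the last benchmark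
--
--         if current_benchmark:
--             if current_benchmark not in grouped_stats:
--                 grouped_stats[current_benchmark] = []
--             grouped_stats[current_benchmark].append(stat)
--
--     # Rebuild the list in the correct order
--     ordered_stats = []
--
--     # First add list benchmarks in order
--     for benchmark in list_order:
--         if benchmark in grouped_stats:
--             ordered_stats.extend(grouped_stats[benchmark])
--
--     # Then add tree benchmarks in order
--     for benchmark in tree_order:
--         if benchmark in grouped_stats:
--             ordered_stats.extend(grouped_stats[benchmark])
--
--     return ordered_stats
-- ===== SOURCE B (Python) =====
-- def sort_benchmarks(stats):
--     """Table-driven classification + one filter pass per category in the combined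
--     order (no if/elif chain, no dict of buckets, no sort)."""
--     rules = [
--         ("sized list", "sized"),
--         ("duplicate list", "duplicate"),
--         ("unique list", "unique"),
--         ("sorted list", "sorted"),
--         ("even list", "even"),
--         ("bst", "bst"),
--         ("sized tree", "depth"),
--         ("complete tree", "complete"),
--         ("red-black tree", "rbtree"),
--     ]
--     order = ["sized", "duplicate", "unique", "sorted", "even",
--              "depth", "complete", "bst", "rbtree"]
--
--     annotated = []
--     current = None
--     for stat in stats:
--         name = stat["name"].lower()
--         current = next((cat for sub, cat in rules if sub in name), current)
--         annotated.append((current, stat))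
--
--     return [stat for cat in order for c, stat in annotated if c == cat]
-- ===== Notes on version B (the rewrite author's own statement) =====
-- stated objective: simpler
-- what changed: Replaces the if/elif chain, dict-of-buckets and two ordered concatenation loops by a table-driven first-matching-rule classification and one filter pass per category in the combined order.
import Mathlib
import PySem

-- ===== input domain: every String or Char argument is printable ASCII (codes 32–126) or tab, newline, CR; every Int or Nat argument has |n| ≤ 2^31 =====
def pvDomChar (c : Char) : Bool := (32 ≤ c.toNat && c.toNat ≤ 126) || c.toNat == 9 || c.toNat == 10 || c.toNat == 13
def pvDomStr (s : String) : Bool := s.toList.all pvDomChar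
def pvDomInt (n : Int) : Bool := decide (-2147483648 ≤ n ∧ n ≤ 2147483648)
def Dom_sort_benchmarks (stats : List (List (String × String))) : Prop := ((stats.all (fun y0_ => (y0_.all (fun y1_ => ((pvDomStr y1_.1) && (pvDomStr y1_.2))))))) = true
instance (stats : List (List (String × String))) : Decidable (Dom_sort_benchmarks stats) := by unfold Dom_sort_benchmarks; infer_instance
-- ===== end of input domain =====

-- B replaces A's if/elif chain + dict-of-buckets + two concatenation loops by a
-- table-driven classification and one filter pass per category in the combined
-- order (objective: simpler; no dict, no sort).

-- ===== PORT A =====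
def pvListOrder : List String := ["sized", "duplicate", "unique", "sorted", "even", "depth", "complete"]
def pvTreeOrder : List String := ["bst", "rbtree"]

-- A's if/elif classification chain on stat["name"].lower()
def pvClassifyA (cur : Option String) (stat : List (String × String)) : Option String :=
  let name := PySem.Str.lower ((PySem.Dict.ofList stat).getD "name" "")
  if PySem.Str.isIn "sized list" name then some "sized"
  else if PySem.Str.isIn "duplicate list" name then some "duplicate"
  else if PySem.Str.isIn "unique list" name then some "unique"
  else if PySem.Str.isIn "sorted list" name then some "sorted"
  else if PySem.Str.isIn "even list" name then some "even"
  else if PySem.Str.isIn "bst" name then some "bst"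
  else if PySem.Str.isIn "sized tree" name then some "depth"
  else if PySem.Str.isIn "complete tree" name then some "complete"
  else if PySem.Str.isIn "red-black tree" name then some "rbtree"
  else cur

-- A's grouping loop: `if c not in grouped: grouped[c] = []` + `grouped[c].append(stat)`
def pvStepA (acc : PySem.Dict String (List (List (String × String))) × Option String)
    (stat : List (String × String)) :
    PySem.Dict String (List (List (String × String))) × Option String :=
  let cur := pvClassifyA acc.2 stat
  match cur with
  | some c => (acc.1.insert c (acc.1.getD c [] ++ [stat]), cur)
  | none => (acc.1, cur)

def sort_benchmarks (stats : List (List (String × String))) : List (List (String × String)) :=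
  let grouped := (stats.foldl pvStepA (PySem.Dict.empty, none)).1
  let ordered₁ := pvListOrder.foldl
    (fun out b => if grouped.contains b then out ++ grouped.getD b [] else out) []
  pvTreeOrder.foldl
    (fun out b => if grouped.contains b then out ++ grouped.getD b [] else out) ordered₁

-- ===== PORT B =====
def pvRules : List (String × String) :=
  [("sized list", "sized"), ("duplicate list", "duplicate"), ("unique list", "unique"),
   ("sorted list", "sorted"), ("even list", "even"), ("bst", "bst"),
   ("sized tree", "depth"), ("complete tree", "complete"), ("red-black tree", "rbtree")]

def pvOrder : List String := ["sized", "duplicate", "unique", "sorted", "even", "depth", "complete", "bst", "rbtree"]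

-- B's annotation loop: `current = next((cat for sub, cat in rules if sub in name), current)`
def pvStepB (acc : List (Option String × List (String × String)) × Option String)
    (stat : List (String × String)) :
    List (Option String × List (String × String)) × Option String :=
  let name := PySem.Str.lower ((PySem.Dict.ofList stat).getD "name" "")
  let cur := match pvRules.find? (fun r => PySem.Str.isIn r.1 name) with
             | some r => some r.2
             | none => acc.2
  (acc.1 ++ [(cur, stat)], cur)

def sort_benchmarks_alt (stats : List (List (String × String))) : List (List (String × String)) :=
  let annotated := (stats.foldl pvStepB ([], none)).1
  pvOrder.flatMap (fun cat => (annotated.filter (fun p => p.1 == some cat)).map (fun p => p.2))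

-- ===== PRECONDITION & SPEC =====
-- Pre_ excludes inputs where some stat has no "name" key: there both Pythons raise KeyError.
def Pre_sort_benchmarks (stats : List (List (String × String))) : Prop :=
  ∀ s ∈ stats, s.any (fun p => p.1 = "name")
instance (stats : List (List (String × String))) : Decidable (Pre_sort_benchmarks stats) := by
  unfold Pre_sort_benchmarks; infer_instance

def pvWitness_sort_benchmarks : (List (List (String × String))) :=
  [[("name", "BST easy"), ("time", "3")], [("name", "sized list"), ("time", "1")]]

def Spec_sort_benchmarks (stats : List (List (String × String))) (out : List (List (String × String))) : Prop := out = sort_benchmarks_alt stats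
instance (stats : List (List (String × String))) (out : List (List (String × String))) : Decidable (Spec_sort_benchmarks stats out) := by unfold Spec_sort_benchmarks; infer_instance

-- ===== CLAIM (what is proved, stated in full; the proofs are below) =====
def Claim_equal_sort_benchmarks : Prop := ∀ (stats : List (List (String × String))), Dom_sort_benchmarks stats → Pre_sort_benchmarks stats → Spec_sort_benchmarks stats (sort_benchmarks stats)

-- ===== LEMMAS AND PROOFS =====

-- B's table lookup decides the same category as A's if/elif chain
lemma classify_eq (cur : Option String) (stat : List (String × String)) :
    (match pvRules.find? (fun r => PySem.Str.isIn r.1 (PySem.Str.lower ((PySem.Dict.ofList stat).getD "name" ""))) with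
     | some r => some r.2
     | none => cur) = pvClassifyA cur stat := by
  unfold pvClassifyA pvRules
  dsimp only
  simp only [List.find?]
  split_ifs <;> simp_all

-- the annotation of the input: each stat paired with the running category at it
def pvAnn : Option String → List (List (String × String)) → List (Option String × List (String × String))
  | _, [] => []
  | cur, s :: ss => (pvClassifyA cur s, s) :: pvAnn (pvClassifyA cur s) ss

-- A's grouping loop builds, for every key b, the b-filtered annotation
lemma loopA (ss : List (List (String × String))) (cur : Option String)
    (g : PySem.Dict String (List (List (String × String)))) (b : String) :
    ((ss.foldl pvStepA (g, cur)).1).getD b [] =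
      g.getD b [] ++ ((pvAnn cur ss).filter (fun p => p.1 == some b)).map (fun p => p.2) := by
  induction ss generalizing cur g with
  | nil => simp [pvAnn]
  | cons s ss ih =>
    simp only [List.foldl_cons, pvAnn]
    rcases hc : pvClassifyA cur s with _ | c
    · simp only [pvStepA, hc]
      rw [ih]
      simp
    · simp only [pvStepA, hc]
      rw [ih]
      rw [PySem.Dict.getD_insert]
      by_cases hb : b = c
      · subst hb; simp
      · simp [hb, Ne.symm hb]

-- B's loop builds exactly the annotation
lemma loopB (ss : List (List (String × String))) (cur : Option String)
    (ps : List (Option String × List (String × String))) :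
    (ss.foldl pvStepB (ps, cur)).1 = ps ++ pvAnn cur ss := by
  induction ss generalizing cur ps with
  | nil => simp [pvAnn]
  | cons s ss ih =>
    simp only [List.foldl_cons, pvAnn, pvStepB, classify_eq]
    rw [ih]
    simp

-- A's ordered-concatenation loop, with the redundant `contains` test removed
lemma concatA (L : List String) (g : PySem.Dict String (List (List (String × String))))
    (init : List (List (String × String))) :
    L.foldl (fun out b => if g.contains b then out ++ g.getD b [] else out) init =
      init ++ L.flatMap (fun b => g.getD b []) := by
  induction L generalizing init with
  | nil => simp
  | cons b L ih =>
    simp only [List.foldl_cons, List.flatMap_cons]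
    by_cases h : g.contains b
    · rw [if_pos h, ih, List.append_assoc]
    · rw [if_neg h, ih, PySem.Dict.getD_of_not_contains g [] (by simpa using h)]
      simp

theorem sort_benchmarks_eq (stats : List (List (String × String))) :
    sort_benchmarks stats = sort_benchmarks_alt stats := by
  unfold sort_benchmarks sort_benchmarks_alt
  rw [concatA, concatA, List.nil_append, ← List.flatMap_append, loopB stats none [], List.nil_append]
  have horder : pvListOrder ++ pvTreeOrder = pvOrder := by decide
  rw [horder]
  apply List.flatMap_congr
  intro b _
  rw [loopA stats none PySem.Dict.empty b, PySem.Dict.getD_empty, List.nil_append]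

-- ===== VERDICT (by name: the statement is the Claim_ definition above) =====
theorem sort_benchmarks_spec : Claim_equal_sort_benchmarks := by
  intro stats _ _
  unfold Spec_sort_benchmarks
  exact sort_benchmarks_eq stats
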